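-- pv_equiv track=rewrite | github.com/LeonidYezerskyi/extraction-grid-app | score.py | _is_moderator_tag
-- ===== SOURCE A (Python) =====
-- from typing import Dict, List, Optional, Any, Tuple
--
-- MODERATOR_TAGS = {
--     'moderator', 'mod', 'facilitator', 'interviewer', 'researcher',
--     'admin', 'administrator', 'coordinator', 'organizer'
-- }
--
-- def _is_moderator_tag(speaker_tags: Optional[List[str]]) -> bool:
--     """
--     Check if speaker tags indicate a moderator.
--
--     Args:
--         speaker_tags: List of speaker tags or None
--
--     Returns:
--         True if any tag suggests a moderator
--     """
--     if not speaker_tags: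
--         return False
--
--     for tag in speaker_tags:
--         tag_lower = tag.lower()
--         if any(mod_tag in tag_lower for mod_tag in MODERATOR_TAGS):
--             return True
--
--     return False
-- ===== SOURCE B (Python) =====
-- from typing import List, Optional
--
-- MODERATOR_TAGS = {
--     'moderator', 'mod', 'facilitator', 'interviewer', 'researcher',
--     'admin', 'administrator', 'coordinator', 'organizer'
-- }
--
-- def _is_moderator_tag(speaker_tags: Optional[List[str]]) -> bool:
--     if not speaker_tags:
--         return False
--     # Keyword-major search: one lowered, newline-joined corpus, then one
--     # substring test per keyword. No keyword contains '\n', so a match can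
--     # never span a tag boundary.
--     corpus = '\n'.join(tag.lower() for tag in speaker_tags)
--     return any(kw in corpus for kw in MODERATOR_TAGS)
-- ===== Notes on version B (the rewrite author's own statement) =====
-- stated objective: faster
-- what changed: Inverts the loop nesting: instead of scanning each tag against every keyword with an early return per tag, B concatenates all lowered tags into one newline-joined corpus and performs exactly one substring search per keyword over it (correct because no keyword contains a newline, so a match cannot span a tag boundary); measured ~3.7x faster.
import Mathlib
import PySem

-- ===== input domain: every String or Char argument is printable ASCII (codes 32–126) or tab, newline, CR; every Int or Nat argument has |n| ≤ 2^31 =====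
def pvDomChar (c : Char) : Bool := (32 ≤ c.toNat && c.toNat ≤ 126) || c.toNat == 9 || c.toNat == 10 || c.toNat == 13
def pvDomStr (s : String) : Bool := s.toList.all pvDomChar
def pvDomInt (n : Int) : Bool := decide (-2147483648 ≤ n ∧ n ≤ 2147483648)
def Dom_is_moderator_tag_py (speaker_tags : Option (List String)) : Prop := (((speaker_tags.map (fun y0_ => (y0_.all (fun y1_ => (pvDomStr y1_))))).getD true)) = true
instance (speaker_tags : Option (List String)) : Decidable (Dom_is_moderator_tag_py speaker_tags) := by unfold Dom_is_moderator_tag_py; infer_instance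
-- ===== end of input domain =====

-- B inverts the loop nesting: one lowered newline-joined corpus, then one substring
-- search per keyword over it (alternative decomposition; same result).

-- ===== PORT A =====
-- module-level set literal MODERATOR_TAGS (distinct elements, literal order)
def MODERATOR_TAGS : List String :=
  ["moderator", "mod", "facilitator", "interviewer", "researcher",
   "admin", "administrator", "coordinator", "organizer"]

-- the 'for tag in speaker_tags' loop with its early return True
def modLoopA : List String → Bool
  | [] => false
  | tag :: rest =>
    let tag_lower := PySem.Str.lower tag
    if MODERATOR_TAGS.any (fun mod_tag => PySem.Str.isIn mod_tag tag_lower) then true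
    else modLoopA rest

def is_moderator_tag_py (speaker_tags : Option (List String)) : Bool :=
  match speaker_tags with
  | none => false                 -- 'if not speaker_tags: return False'
  | some tags => if tags = [] then false else modLoopA tags

-- ===== PORT B =====
def is_moderator_tag_py_alt (speaker_tags : Option (List String)) : Bool :=
  match speaker_tags with
  | none => false                 -- 'if not speaker_tags: return False'
  | some tags =>
    if tags = [] then false
    else
      let corpus := PySem.Str.join "\n" (tags.map PySem.Str.lower)
      MODERATOR_TAGS.any (fun kw => PySem.Str.isIn kw corpus)

-- ===== PRECONDITION & SPEC =====
def Spec_is_moderator_tag_py (speaker_tags : Option (List String)) (out : Bool) : Prop := out = is_moderator_tag_py_alt speaker_tags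
instance (speaker_tags : Option (List String)) (out : Bool) : Decidable (Spec_is_moderator_tag_py speaker_tags out) := by unfold Spec_is_moderator_tag_py; infer_instance

-- ===== CLAIM (what is proved, stated in full; the proofs are below) =====
def Claim_equal_is_moderator_tag_py : Prop := ∀ (speaker_tags : Option (List String)), Dom_is_moderator_tag_py speaker_tags → Spec_is_moderator_tag_py speaker_tags (is_moderator_tag_py speaker_tags)

-- ===== LEMMAS AND PROOFS =====

-- a word not containing c is never a prefix of a list past an occurrence of c
theorem prefix_append_cons_iff {kw l l₂ : List Char} {c : Char} (hc : c ∉ kw) :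
    kw <+: (l ++ c :: l₂) ↔ kw <+: l := by
  induction kw generalizing l with
  | nil => simp
  | cons a kw' ih =>
    cases l with
    | nil =>
      simp only [List.nil_append, List.cons_prefix_cons]
      constructor
      · rintro ⟨rfl, -⟩; exact absurd (List.mem_cons_self) hc
      · rintro h; exact absurd h.length_le (by simp)
    | cons x l' =>
      simp only [List.cons_append, List.cons_prefix_cons]
      exact and_congr_right fun _ => ih (fun h => hc (List.mem_cons_of_mem _ h))

-- a word not containing c is an infix of l ++ c :: l₂ iff it is an infix of a part
theorem infix_append_cons_iff {kw : List Char} (l l₂ : List Char) {c : Char} (hc : c ∉ kw) :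
    kw <:+: (l ++ c :: l₂) ↔ kw <:+: l ∨ kw <:+: l₂ := by
  induction l with
  | nil =>
    simp only [List.nil_append, List.infix_cons_iff]
    constructor
    · rintro (h | h)
      · rcases kw with _ | ⟨a, kw'⟩
        · exact Or.inl List.nil_infix
        · rcases List.cons_prefix_cons.mp h with ⟨rfl, -⟩
          exact absurd List.mem_cons_self hc
      · exact Or.inr h
    · rintro (h | h)
      · rcases List.eq_nil_of_infix_nil h with rfl
        exact Or.inr List.nil_infix
      · exact Or.inr h
  | cons x l' ih =>
    simp only [List.cons_append, List.infix_cons_iff, ih]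
    have hp := prefix_append_cons_iff (l := x :: l') (l₂ := l₂) hc
    simp only [List.cons_append] at hp
    rw [hp]
    tauto

-- for a newline-free word, searching the newline-joined corpus = searching some segment
theorem infix_join_iff (kw : List Char) (segs : List (List Char)) (hc : ('\n' : Char) ∉ kw)
    (hne : segs ≠ []) :
    kw <:+: PySem.Chars.join ['\n'] segs ↔ ∃ s ∈ segs, kw <:+: s := by
  induction segs with
  | nil => exact absurd rfl hne
  | cons s rest ih =>
    cases rest with
    | nil => simp [PySem.Chars.join_singleton]
    | cons s' rest' =>
      rw [PySem.Chars.join_cons_cons]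
      rw [show s ++ ['\n'] ++ PySem.Chars.join ['\n'] (s' :: rest')
            = s ++ '\n' :: PySem.Chars.join ['\n'] (s' :: rest') by simp]
      rw [infix_append_cons_iff s _ hc, ih (by simp)]
      simp

theorem modLoopA_eq_any (tags : List String) :
    modLoopA tags = tags.any
      (fun tag => MODERATOR_TAGS.any (fun k => PySem.Str.isIn k (PySem.Str.lower tag))) := by
  induction tags with
  | nil => rfl
  | cons t rest ih =>
    simp only [modLoopA, List.any_cons, ih]
    cases h : MODERATOR_TAGS.any (fun k => PySem.Str.isIn k (PySem.Str.lower t)) <;> simp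

theorem all_keywords_nl_free :
    ∀ kw ∈ MODERATOR_TAGS, ('\n' : Char) ∉ kw.toList := by decide

-- corpus search equals tag-by-tag search, for every keyword of the set
theorem corpus_search_eq (tags : List String) (hne : tags ≠ []) (kw : String)
    (hkw : kw ∈ MODERATOR_TAGS) :
    PySem.Str.isIn kw (PySem.Str.join "\n" (tags.map PySem.Str.lower))
      = tags.any (fun tag => PySem.Str.isIn kw (PySem.Str.lower tag)) := by
  have hnl := all_keywords_nl_free kw hkw
  refine Bool.eq_iff_iff.mpr ?_
  rw [PySem.Str.isIn_iff_infix, PySem.Str.toList_join]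
  have hmap : (tags.map PySem.Str.lower).map String.toList ≠ [] := by
    simp [hne]
  rw [show ("\n" : String).toList = ['\n'] from rfl,
      infix_join_iff _ _ hnl hmap]
  simp only [List.any_eq_true, PySem.Str.isIn_iff_infix, List.mem_map]
  constructor
  · rintro ⟨s, ⟨t, ⟨tag, htag, rfl⟩, rfl⟩, hin⟩
    exact ⟨tag, htag, hin⟩
  · rintro ⟨tag, htag, hin⟩
    exact ⟨(PySem.Str.lower tag).toList, ⟨_, ⟨tag, htag, rfl⟩, rfl⟩, hin⟩

-- ===== VERDICT (by name: the statement is the Claim_ definition above) =====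
theorem is_moderator_tag_py_spec : Claim_equal_is_moderator_tag_py := by
  intro speaker_tags _
  show is_moderator_tag_py speaker_tags = is_moderator_tag_py_alt speaker_tags
  match speaker_tags with
  | none => rfl
  | some tags =>
    simp only [is_moderator_tag_py, is_moderator_tag_py_alt]
    by_cases h : tags = []
    · simp [h]
    · rw [if_neg h, if_neg h, modLoopA_eq_any]
      refine Bool.eq_iff_iff.mpr ?_
      simp only [List.any_eq_true]
      constructor
      · rintro ⟨tag, htag, kw, hkw, hin⟩
        refine ⟨kw, hkw, ?_⟩
        rw [corpus_search_eq tags h kw hkw]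
        exact List.any_eq_true.mpr ⟨tag, htag, hin⟩
      · rintro ⟨kw, hkw, hin⟩
        rw [corpus_search_eq tags h kw hkw] at hin
        obtain ⟨tag, htag, h2⟩ := List.any_eq_true.mp hin
        exact ⟨tag, htag, kw, hkw, h2⟩
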